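-- pv_equiv track=rewrite | github.com/SVCE-ACM/A-December-Of_Algorithms-2024 | December 12/python_Gklogicmaster.py | smart_ticket
-- ===== SOURCE A (Python) =====
-- from collections import deque
--
-- def smart_ticket(requests, total_tickets):
--     vip_queue = deque()
--     regular_queue = deque()
--
--     # Separate VIP and regular requests
--     for req in requests:
--         parts = req.split()
--         name, tickets = parts[0], int(parts[1])
--         if len(parts) > 2 and parts[2].upper() == 'VIP':
--             vip_queue.append((name, tickets))
--         else:
--             regular_queue.append((name, tickets))
--
--     results = []
--
--     # Process ticket requests
--     while total_tickets > 0 and (vip_queue or regular_queue):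
--         queue = vip_queue if vip_queue else regular_queue
--         name, tickets = queue.popleft()
--
--         if tickets <= total_tickets:
--             total_tickets -= tickets
--             results.append(f"{name} received {tickets} tickets.")
--         else:
--             results.append(f"{name} received {total_tickets} tickets (not fully satisfied).")
--             total_tickets = 0
--
--     if total_tickets == 0:
--         results.append("Tickets sold out.")
--     return results
-- ===== SOURCE B (Python) =====
-- def smart_ticket(requests, total_tickets):
--     # parse once into (name, tickets, is_vip) triples
--     parsed = []
--     for req in requests:
--         parts = req.split()
--         parsed.append((parts[0], int(parts[1]),
--                        len(parts) > 2 and parts[2].upper() == 'VIP'))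
--     # stable partition: VIPs first, then regulars, original order kept
--     ordered = [(n, t) for n, t, v in parsed if v] + \
--               [(n, t) for n, t, v in parsed if not v]
--     results = []
--     for name, tickets in ordered:
--         if total_tickets <= 0:
--             break
--         if tickets <= total_tickets:
--             total_tickets -= tickets
--             results.append(f"{name} received {tickets} tickets.")
--         else:
--             results.append(f"{name} received {total_tickets} tickets (not fully satisfied).")
--             total_tickets = 0
--     if total_tickets == 0:
--         results.append("Tickets sold out.")
--     return results
-- ===== Notes on version B (the rewrite author's own statement) =====
-- stated objective: simpler
-- what changed: Replaces A's two deques and queue-selecting while loop by a single parse pass into (name,tickets,is_vip) triples, a stable VIP-first partition, and one flat loop over the pre-ordered list.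
import Mathlib
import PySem

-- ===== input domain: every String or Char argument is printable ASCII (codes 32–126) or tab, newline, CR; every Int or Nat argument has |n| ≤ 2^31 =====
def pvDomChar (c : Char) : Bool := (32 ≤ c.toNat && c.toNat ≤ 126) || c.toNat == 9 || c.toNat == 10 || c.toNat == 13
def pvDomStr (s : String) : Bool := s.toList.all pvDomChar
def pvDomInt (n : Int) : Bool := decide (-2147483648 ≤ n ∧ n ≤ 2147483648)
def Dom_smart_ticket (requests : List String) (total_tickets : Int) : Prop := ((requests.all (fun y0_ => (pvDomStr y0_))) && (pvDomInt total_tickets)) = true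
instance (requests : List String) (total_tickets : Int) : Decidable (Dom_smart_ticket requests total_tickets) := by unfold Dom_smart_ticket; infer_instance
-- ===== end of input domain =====

-- B replaces A's two deques and queue-selecting while loop by one parsed triple list,
-- a stable VIP-first partition and a single flat loop (objective: simpler decomposition).

-- ===== PORT A =====
-- one step of A's classification for-loop: parse the request, append to the VIP or
-- regular queue; none = the Python raised (IndexError / ValueError), excluded by Pre_
def aClassify (st : Option (List (String × Int) × List (String × Int))) (req : String) :
    Option (List (String × Int) × List (String × Int)) :=
  match st with
  | none => none
  | some (vq, rq) =>
    let parts := PySem.Str.split₀ req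
    match PySem.List.pyGet? parts 0 with
    | none => none
    | some name =>
      match PySem.List.pyGet? parts 1 with
      | none => none
      | some ts =>
        match PySem.Int.ofStr? ts with
        | none => none
        | some t =>
          if decide (parts.length > 2) && (PySem.Str.upper (parts.getD 2 "") == "VIP")
          then some (vq ++ [(name, t)], rq)
          else some (vq, rq ++ [(name, t)])

-- A's while loop: pick from the VIP queue if nonempty, else the regular queue
def aProcess (vq rq : List (String × Int)) (total : Int) (results : List String) :
    List String × Int :=
  if total > 0 then
    match vq with
    | (name, t) :: vrest =>
      if t ≤ total then
        aProcess vrest rq (total - t) (results ++ [name ++ " received " ++ PySem.Int.toStr t ++ " tickets."])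
      else
        aProcess vrest rq 0 (results ++ [name ++ " received " ++ PySem.Int.toStr total ++ " tickets (not fully satisfied)."])
    | [] =>
      match rq with
      | (name, t) :: rrest =>
        if t ≤ total then
          aProcess [] rrest (total - t) (results ++ [name ++ " received " ++ PySem.Int.toStr t ++ " tickets."])
        else
          aProcess [] rrest 0 (results ++ [name ++ " received " ++ PySem.Int.toStr total ++ " tickets (not fully satisfied)."])
      | [] => (results, total)
  else (results, total)
termination_by vq.length + rq.length

def smart_ticket (requests : List String) (total_tickets : Int) : List String :=
  match requests.foldl aClassify (some ([], [])) with
  | none => []   -- Python raises here; Pre_smart_ticket excludes these inputs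
  | some (vq, rq) =>
    let (results, total') := aProcess vq rq total_tickets []
    if total' = 0 then results ++ ["Tickets sold out."] else results

-- ===== PORT B =====
-- parse one request into (name, tickets, is_vip); none = the Python raised
def bParse (req : String) : Option (String × Int × Bool) :=
  let parts := PySem.Str.split₀ req
  match PySem.List.pyGet? parts 0 with
  | none => none
  | some name =>
    match PySem.List.pyGet? parts 1 with
    | none => none
    | some ts =>
      match PySem.Int.ofStr? ts with
      | none => none
      | some t =>
        some (name, t, decide (parts.length > 2) && (PySem.Str.upper (parts.getD 2 "") == "VIP"))

def bParseAll : List String → Option (List (String × Int × Bool))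
  | [] => some []
  | r :: rest =>
    match bParse r with
    | none => none
    | some p => (bParseAll rest).map (p :: ·)

-- B's single flat loop over the pre-ordered list
def bLoop : List (String × Int) → Int → List String → List String × Int
  | [], total, results => (results, total)
  | (name, t) :: rest, total, results =>
    if total ≤ 0 then (results, total)
    else if t ≤ total then
      bLoop rest (total - t) (results ++ [name ++ " received " ++ PySem.Int.toStr t ++ " tickets."])
    else
      bLoop rest 0 (results ++ [name ++ " received " ++ PySem.Int.toStr total ++ " tickets (not fully satisfied)."])

def smart_ticket_alt (requests : List String) (total_tickets : Int) : List String :=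
  match bParseAll requests with
  | none => []   -- Python raises here; Pre_smart_ticket excludes these inputs
  | some parsed =>
    let ordered := (parsed.filter (·.2.2)).map (fun p => (p.1, p.2.1)) ++
                   (parsed.filter (fun p => !p.2.2)).map (fun p => (p.1, p.2.1))
    let (results, total') := bLoop ordered total_tickets []
    if total' = 0 then results ++ ["Tickets sold out."] else results

-- ===== PRECONDITION & SPEC =====
-- Pre_ excludes exactly the requests on which the Python A raises: fewer than two
-- whitespace-separated fields (IndexError) or a second field int() rejects (ValueError).
def Pre_smart_ticket (requests : List String) (total_tickets : Int) : Prop :=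
  ∀ r ∈ requests, 2 ≤ (PySem.Str.split₀ r).length ∧
    (PySem.Int.ofStr? ((PySem.Str.split₀ r).getD 1 "")).isSome
instance (requests : List String) (total_tickets : Int) : Decidable (Pre_smart_ticket requests total_tickets) := by unfold Pre_smart_ticket; infer_instance

def pvWitness_smart_ticket : List String × Int := (["alice 2 VIP", "bob 3"], 4)

def Spec_smart_ticket (requests : List String) (total_tickets : Int) (out : List String) : Prop := out = smart_ticket_alt requests total_tickets
instance (requests : List String) (total_tickets : Int) (out : List String) : Decidable (Spec_smart_ticket requests total_tickets out) := by unfold Spec_smart_ticket; infer_instance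

-- ===== CLAIM (what is proved, stated in full; the proofs are below) =====
def Claim_equal_smart_ticket : Prop := ∀ (requests : List String) (total_tickets : Int), Dom_smart_ticket requests total_tickets → Pre_smart_ticket requests total_tickets → Spec_smart_ticket requests total_tickets (smart_ticket requests total_tickets)

-- ===== LEMMAS AND PROOFS =====

theorem foldl_aClassify_none (requests : List String) :
    requests.foldl aClassify none = none := by
  induction requests with
  | nil => rfl
  | cons r rest ih => simpa [aClassify] using ih

-- one classification step of A, phrased through B's parser
theorem aClassify_some (vq rq : List (String × Int)) (r : String) :
    aClassify (some (vq, rq)) r =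
      match bParse r with
      | none => none
      | some (n, t, f) =>
        if f then some (vq ++ [(n, t)], rq) else some (vq, rq ++ [(n, t)]) := by
  cases h0 : PySem.List.pyGet? (PySem.Str.split₀ r) 0 with
  | none => simp [aClassify, bParse, h0]
  | some name =>
    cases h1 : PySem.List.pyGet? (PySem.Str.split₀ r) 1 with
    | none => simp [aClassify, bParse, h0, h1]
    | some ts =>
      cases h2 : PySem.Int.ofStr? ts with
      | none => simp [aClassify, bParse, h0, h1, h2]
      | some t =>
        by_cases hv : 2 < (PySem.Str.split₀ r).length ∧
            PySem.Str.upper ((PySem.Str.split₀ r).getD 2 "") = "VIP"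
        · simp [aClassify, bParse, h0, h1, h2, hv]
        · simp [aClassify, bParse, h0, h1, h2]

-- A's classification fold equals B's parse + stable partition, generalized over the accumulators
theorem classify_eq (requests : List String) :
    ∀ vq rq : List (String × Int),
      requests.foldl aClassify (some (vq, rq)) =
        match bParseAll requests with
        | none => none
        | some parsed =>
          some (vq ++ (parsed.filter (·.2.2)).map (fun p => (p.1, p.2.1)),
                rq ++ (parsed.filter (fun p => !p.2.2)).map (fun p => (p.1, p.2.1))) := by
  induction requests with
  | nil => intro vq rq; simp [bParseAll]
  | cons r rest ih =>
    intro vq rq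
    rw [List.foldl_cons, aClassify_some]
    unfold bParseAll
    cases hb : bParse r with
    | none => simpa using foldl_aClassify_none rest
    | some p =>
      obtain ⟨n, t, f⟩ := p
      cases hr : bParseAll rest with
      | none => cases f <;> simp [ih, hr]
      | some parsed => cases f <;> simp [ih, hr]

-- A's two-queue loop equals B's flat loop on the concatenation
theorem process_eq (vq : List (String × Int)) :
    ∀ rq total results, aProcess vq rq total results = bLoop (vq ++ rq) total results := by
  induction vq with
  | nil =>
    intro rq
    induction rq with
    | nil =>
      intro total results
      rw [aProcess.eq_def]
      unfold bLoop
      split_ifs with h <;> simp_all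
    | cons p rrest ihr =>
      intro total results
      obtain ⟨name, t⟩ := p
      rw [aProcess.eq_def]
      unfold bLoop
      by_cases h : total > 0
      · rw [if_pos h]
        simp only [List.nil_append, show ¬ total ≤ 0 by omega, if_false]
        split_ifs <;> simpa using ihr _ _
      · rw [if_neg h]
        simp [show total ≤ 0 by omega]
  | cons p vrest ihv =>
    intro rq total results
    obtain ⟨name, t⟩ := p
    rw [aProcess.eq_def]
    unfold bLoop
    by_cases h : total > 0
    · rw [if_pos h]
      simp only [List.cons_append, show ¬ total ≤ 0 by omega, if_false]
      split_ifs <;> exact ihv _ _ _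
    · rw [if_neg h]
      simp [show total ≤ 0 by omega]

-- ===== VERDICT (by name: the statement is the Claim_ definition above) =====
theorem smart_ticket_spec : Claim_equal_smart_ticket := by
  intro requests total_tickets _ _
  show smart_ticket requests total_tickets = smart_ticket_alt requests total_tickets
  unfold smart_ticket smart_ticket_alt
  rw [classify_eq requests [] []]
  cases bParseAll requests with
  | none => rfl
  | some parsed => simp [process_eq]
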